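-- pv_equiv track=rewrite | github.com/shaunyuencw/adventofcode2023 | day11/main.py | dp_count_spaces
-- ===== SOURCE A (Python) =====
-- def is_empty_galaxy(star_list):
--     return all(star == '.' for star in star_list)
--
-- def dp_count_spaces(matrix):
--     rows, cols = len(matrix), len(matrix[0])
--     dp_matrix = [[(0, 0) for _ in range(cols)] for _ in range(rows)]
--     empty_rows, empty_cols = 0, 0
--
--     # Counting empty rows
--     for row in range(rows):
--         if is_empty_galaxy(matrix[row]):
--             empty_rows += 1
--         for col in range(cols):
--             dp_matrix[row][col] = (empty_rows, dp_matrix[row][col][1])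
--
--     # Counting empty columns
--     for col in range(cols):
--         # Extracting column view
--         column_view = [matrix[row][col] for row in range(rows)]
--         if is_empty_galaxy(column_view):
--             empty_cols += 1
--         for row in range(rows):
--             dp_matrix[row][col] = (dp_matrix[row][col][0], empty_cols)
--
--     return dp_matrix
-- ===== SOURCE B (Python) =====
-- def dp_count_spaces(matrix):
--     cols = len(matrix[0])
--     # sieve: columns whose entries have all been '.' so far
--     alive = list(range(cols))
--     empty_rows_idx = []
--     for r, row in enumerate(matrix):
--         if all(s == '.' for s in row):
--             empty_rows_idx.append(r)
--         else:
--             alive = [c for c in alive if row[c] == '.']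
--     return [[(sum(1 for e in empty_rows_idx if e <= r),
--               sum(1 for e in alive if e <= c)) for c in range(cols)]
--             for r in range(len(matrix))]
-- ===== Notes on version B (the rewrite author's own statement) =====
-- stated objective: alternative
-- what changed: B replaces A's two counter-carrying full-matrix sweeps (and per-column view extraction) by a sieve: one row-major pass that eliminates columns from an alive-column list and records empty-row indices, after which each cell is derived by counting the recorded indices at-or-before its row/column.
import Mathlib
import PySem

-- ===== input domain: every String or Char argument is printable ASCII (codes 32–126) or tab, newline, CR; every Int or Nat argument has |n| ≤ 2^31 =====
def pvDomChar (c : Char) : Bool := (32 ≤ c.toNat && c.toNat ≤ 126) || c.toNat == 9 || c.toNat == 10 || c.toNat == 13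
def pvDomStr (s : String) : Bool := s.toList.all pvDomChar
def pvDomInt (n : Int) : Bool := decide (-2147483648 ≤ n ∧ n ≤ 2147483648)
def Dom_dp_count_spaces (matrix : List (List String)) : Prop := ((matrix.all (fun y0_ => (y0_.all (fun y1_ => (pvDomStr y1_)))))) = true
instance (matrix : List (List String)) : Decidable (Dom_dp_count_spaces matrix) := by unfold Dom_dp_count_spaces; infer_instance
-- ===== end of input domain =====

-- B replaces A's two counter-carrying full-matrix sweeps by a sieve: one row-major pass
-- eliminates columns from an alive-column list and records empty-row indices, and each
-- cell is then derived by counting recorded indices at-or-before it (objective: alternative).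

-- ===== PORT A =====
def isEmptyGalaxy (starList : List String) : Bool := starList.all (fun star => star == ".")

def dp_count_spaces (matrix : List (List String)) : List (List (Int × Int)) :=
  let rows := matrix.length
  let cols := (matrix.headD []).length
  let init : List (List (Int × Int)) := List.replicate rows (List.replicate cols ((0:Int), (0:Int)))
  -- Counting empty rows: for row in range(rows)
  let st1 := (List.range rows).foldl (fun (st : List (List (Int × Int)) × Int) r =>
      let er := if isEmptyGalaxy (matrix.getD r []) then st.2 + 1 else st.2
      -- for col in range(cols): dp[row][col] = (empty_rows, dp[row][col][1])
      let row' := (List.range cols).foldl (fun acc c =>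
          acc.set c (er, (acc.getD c ((0:Int), (0:Int))).2)) (st.1.getD r [])
      (st.1.set r row', er)) (init, 0)
  -- Counting empty columns: for col in range(cols)
  let st2 := (List.range cols).foldl (fun (st : List (List (Int × Int)) × Int) c =>
      let columnView := (List.range rows).map (fun r => (matrix.getD r []).getD c "")
      let ec := if isEmptyGalaxy columnView then st.2 + 1 else st.2
      -- for row in range(rows): dp[row][col] = (dp[row][col][0], empty_cols)
      let dp := (List.range rows).foldl (fun acc r =>
          acc.set r ((acc.getD r []).set c (((acc.getD r []).getD c ((0:Int),(0:Int))).1, ec))) st.1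
      (dp, ec)) (st1.1, 0)
  st2.1

-- ===== PORT B =====
def dp_count_spaces_alt (matrix : List (List String)) : List (List (Int × Int)) :=
  let cols := (matrix.headD []).length
  -- one row-major pass: sieve the alive-column list, record empty-row indices
  let st := matrix.zipIdx.foldl
      (fun (st : List Nat × List Nat) rp =>
        if rp.1.all (fun s => s == ".") then (st.1, st.2 ++ [rp.2])
        else (st.1.filter (fun c => rp.1.getD c "" == "."), st.2))
      (List.range cols, [])
  -- each cell counts the recorded indices at-or-before it
  (List.range matrix.length).map (fun r =>
    (List.range cols).map (fun c =>
      (((st.2.countP (fun e => e ≤ r) : Nat) : Int),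
       ((st.1.countP (fun e => e ≤ c) : Nat) : Int))))

-- ===== PRECONDITION & SPEC =====
-- Pre_ excludes exactly the inputs on which Python A raises IndexError:
-- the empty matrix (matrix[0]) and ragged matrices with a row shorter than row 0
-- (matrix[row][col] in the column extraction).
def Pre_dp_count_spaces (matrix : List (List String)) : Prop :=
  matrix ≠ [] ∧ ∀ row ∈ matrix, (matrix.headD []).length ≤ row.length
instance (matrix : List (List String)) : Decidable (Pre_dp_count_spaces matrix) := by
  unfold Pre_dp_count_spaces; infer_instance

def pvWitness_dp_count_spaces : List (List String) := [[".", "#"], [".", "."]]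

def Spec_dp_count_spaces (matrix : List (List String)) (out : List (List (Int × Int))) : Prop := out = dp_count_spaces_alt matrix
instance (matrix : List (List String)) (out : List (List (Int × Int))) : Decidable (Spec_dp_count_spaces matrix out) := by unfold Spec_dp_count_spaces; infer_instance

-- ===== CLAIM (what is proved, stated in full; the proofs are below) =====
def Claim_equal_dp_count_spaces : Prop := ∀ (matrix : List (List String)), Dom_dp_count_spaces matrix → Pre_dp_count_spaces matrix → Spec_dp_count_spaces matrix (dp_count_spaces matrix)

-- ===== LEMMAS AND PROOFS =====

-- prefix count of empty rows among the first k rows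
def erPref (matrix : List (List String)) (k : Nat) : Int :=
  ((matrix.take k).countP isEmptyGalaxy : Nat)

-- whether column c is empty, read the way A reads it
def colEmptyA (matrix : List (List String)) (c : Nat) : Bool :=
  isEmptyGalaxy ((List.range matrix.length).map (fun r => (matrix.getD r []).getD c ""))

-- prefix count of empty columns among the first k columns
def ecPref (matrix : List (List String)) (k : Nat) : Int :=
  (((List.range k).countP (colEmptyA matrix)) : Nat)

lemma map_range_getD {α : Type} (l : List α) (d : α) :
    (List.range l.length).map (fun r => l.getD r d) = l := by
  apply List.ext_getElem
  · simp
  · intro i h1 h2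
    simp [List.getD_eq_getElem?_getD, h2]

-- the shape of both of A's inner assignment loops:
-- repeatedly set index i to a function of the current value at i, for i in range k
lemma fold_set_map {α : Type} (g : α → α) (d : α) :
    ∀ (k : Nat) (l : List α), k ≤ l.length →
      (List.range k).foldl (fun acc i => acc.set i (g (acc.getD i d))) l
        = (l.take k).map g ++ l.drop k := by
  intro k
  induction k with
  | zero => intro l _; simp
  | succ k ih =>
    intro l hk
    have hklt : k < l.length := by omega
    rw [List.range_succ, List.foldl_append, ih l (by omega)]
    have hlen : ((l.take k).map g).length = k := by simp; omega
    have hdrop : l.drop k = l[k] :: l.drop (k + 1) := List.drop_eq_getElem_cons hklt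
    have hget : ((l.take k).map g ++ l.drop k).getD k d = l[k] := by
      rw [hdrop, List.getD_eq_getElem?_getD, List.getElem?_append_right (by omega)]
      simp [Nat.min_eq_left hklt.le, List.getElem?_eq_getElem hklt]
    rw [List.foldl_cons, List.foldl_nil, hget, List.set_append, if_neg (by omega), hlen,
      Nat.sub_self, hdrop, List.set_cons_zero, List.take_add_one,
      List.getElem?_eq_getElem hklt]
    simp only [Option.toList_some, List.map_append, List.map_cons, List.map_nil,
      List.append_assoc, List.singleton_append]

lemma loop1_inv (matrix : List (List String)) (cols : Nat) :
    ∀ k, k ≤ matrix.length →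
      (List.range k).foldl (fun (st : List (List (Int × Int)) × Int) r =>
          let er := if isEmptyGalaxy (matrix.getD r []) then st.2 + 1 else st.2
          let row' := (List.range cols).foldl (fun acc c =>
              acc.set c (er, (acc.getD c ((0:Int), (0:Int))).2)) (st.1.getD r [])
          (st.1.set r row', er))
        (List.replicate matrix.length (List.replicate cols ((0:Int), (0:Int))), 0)
      = ((List.range matrix.length).map (fun r =>
            if r < k then List.replicate cols (erPref matrix (r+1), (0:Int))
            else List.replicate cols ((0:Int), (0:Int))), erPref matrix k) := by
  intro k
  induction k with
  | zero =>
    intro _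
    simp [erPref]
  | succ k ih =>
    intro hk
    have hklt : k < matrix.length := by omega
    rw [List.range_succ, List.foldl_append, ih (by omega), List.foldl_cons, List.foldl_nil]
    have hgetmat : matrix.getD k [] = matrix[k] := by
      rw [List.getD_eq_getElem?_getD, List.getElem?_eq_getElem hklt]; rfl
    have her : (if isEmptyGalaxy (matrix.getD k []) then erPref matrix k + 1 else erPref matrix k) = erPref matrix (k+1) := by
      rw [hgetmat]
      unfold erPref
      rw [List.take_add_one, List.getElem?_eq_getElem hklt]
      rw [List.countP_append]
      simp only [List.countP_cons, List.countP_nil, Option.toList_some]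
      split <;> push_cast <;> ring
    have hrowget : ((List.range matrix.length).map (fun r =>
            if r < k then List.replicate cols (erPref matrix (r+1), (0:Int))
            else List.replicate cols ((0:Int), (0:Int)))).getD k [] = List.replicate cols ((0:Int),(0:Int)) := by
      rw [List.getD_eq_getElem?_getD, List.getElem?_eq_getElem (by simpa using hklt)]
      simp
    have hinner : (List.range cols).foldl (fun acc c =>
          acc.set c (erPref matrix (k+1), (acc.getD c ((0:Int), (0:Int))).2))
          (List.replicate cols ((0:Int),(0:Int)))
        = List.replicate cols (erPref matrix (k+1), (0:Int)) := by
      have := fold_set_map (fun p => (erPref matrix (k+1), p.2)) ((0:Int),(0:Int)) cols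
        (List.replicate cols ((0:Int),(0:Int))) (by simp)
      simpa using this
    simp only [her, hrowget, hinner]
    refine Prod.ext ?_ rfl
    apply List.ext_getElem
    · simp
    · intro i h1 h2
      simp only [List.getElem_set, List.getElem_map, List.getElem_range]
      by_cases hik : k = i
      · subst hik; simp
      · rw [if_neg hik]
        by_cases h3 : i < k
        · rw [if_pos h3, if_pos (by omega)]
        · rw [if_neg h3, if_neg (by omega)]

lemma loop2_inv (matrix : List (List String)) (cols : Nat) :
    ∀ k, k ≤ cols →
      (List.range k).foldl (fun (st : List (List (Int × Int)) × Int) c =>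
          let columnView := (List.range matrix.length).map (fun r => (matrix.getD r []).getD c "")
          let ec := if isEmptyGalaxy columnView then st.2 + 1 else st.2
          let dp := (List.range matrix.length).foldl (fun acc r =>
              acc.set r ((acc.getD r []).set c (((acc.getD r []).getD c ((0:Int),(0:Int))).1, ec))) st.1
          (dp, ec))
        ((List.range matrix.length).map (fun r => List.replicate cols (erPref matrix (r+1), (0:Int))), 0)
      = ((List.range matrix.length).map (fun r => (List.range cols).map (fun c =>
            (erPref matrix (r+1), if c < k then ecPref matrix (c+1) else 0))), ecPref matrix k) := by
  intro k
  induction k with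
  | zero =>
    intro _
    refine Prod.ext ?_ (by simp [ecPref])
    simp only []
    apply List.map_congr_left
    intro r _
    apply List.ext_getElem
    · simp
    · intro i h1 h2
      simp
  | succ k ih =>
    intro hk
    have hklt : k < cols := by omega
    rw [List.range_succ, List.foldl_append, ih (by omega), List.foldl_cons, List.foldl_nil]
    have hec : (if isEmptyGalaxy ((List.range matrix.length).map (fun r => (matrix.getD r []).getD k "")) then ecPref matrix k + 1 else ecPref matrix k) = ecPref matrix (k+1) := by
      unfold ecPref colEmptyA
      rw [List.range_succ, List.countP_append]
      simp only [List.countP_cons, List.countP_nil]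
      split <;> push_cast <;> ring
    have hinner : (List.range matrix.length).foldl (fun acc r =>
          acc.set r ((acc.getD r []).set k (((acc.getD r []).getD k ((0:Int),(0:Int))).1, ecPref matrix (k+1))))
          ((List.range matrix.length).map (fun r => (List.range cols).map (fun c =>
            (erPref matrix (r+1), if c < k then ecPref matrix (c+1) else 0))))
        = (List.range matrix.length).map (fun r => (List.range cols).map (fun c =>
            (erPref matrix (r+1), if c < k + 1 then ecPref matrix (c+1) else 0))) := by
      rw [fold_set_map (fun row => row.set k ((row.getD k ((0:Int),(0:Int))).1, ecPref matrix (k+1))) []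
        matrix.length _ (by simp)]
      rw [List.take_of_length_le (by simp), List.drop_eq_nil_of_le (by simp), List.append_nil, List.map_map]
      apply List.map_congr_left
      intro r _
      simp only [Function.comp]
      have hget : ((List.range cols).map (fun c =>
            (erPref matrix (r+1), if c < k then ecPref matrix (c+1) else (0:Int)))).getD k ((0:Int),(0:Int))
          = (erPref matrix (r+1), (0:Int)) := by
        rw [List.getD_eq_getElem?_getD, List.getElem?_eq_getElem (by simpa using hklt)]
        simp
      rw [hget]
      apply List.ext_getElem
      · simp
      · intro i h1 h2
        simp only [List.getElem_set, List.getElem_map, List.getElem_range]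
        by_cases hik : k = i
        · subst hik; simp
        · rw [if_neg hik]
          by_cases h3 : i < k
          · rw [if_pos h3, if_pos (by omega)]
          · rw [if_neg h3, if_neg (by omega)]
    simp only [hec, hinner]

lemma all_congr_mem {α : Type} (l : List α) (p q : α → Bool) (h : ∀ a ∈ l, p a = q a) :
    l.all p = l.all q := by
  induction l with
  | nil => rfl
  | cons a t ih =>
    simp only [List.all_cons, h a (by simp), ih (fun b hb => h b (by simp [hb]))]

lemma hcol_eq (matrix : List (List String)) (c : Nat) :
    (matrix.all (fun row => row.getD c "" == ".")) = colEmptyA matrix c := by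
  unfold colEmptyA isEmptyGalaxy
  conv_lhs => rw [← map_range_getD matrix []]
  rw [List.all_map, List.all_map]
  rfl

-- B's single sieving pass, characterised: the alive list is the original list filtered
-- by "every row is empty or has '.' there", and the recorded indices are the (offset)
-- indices of the empty rows.
lemma foldB_inv (rs : List (List String)) :
    ∀ (k : Nat) (al er : List Nat),
      (rs.zipIdx k).foldl
        (fun (st : List Nat × List Nat) rp =>
          if rp.1.all (fun s => s == ".") then (st.1, st.2 ++ [rp.2])
          else (st.1.filter (fun c => rp.1.getD c "" == "."), st.2)) (al, er)
      = (al.filter (fun c => rs.all (fun row => isEmptyGalaxy row || row.getD c "" == ".")),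
         er ++ ((List.range rs.length).filter (fun j => isEmptyGalaxy (rs.getD j []))).map (· + k)) := by
  induction rs with
  | nil => intro k al er; simp
  | cons row t ih =>
    intro k al er
    rw [List.zipIdx_cons, List.foldl_cons]
    by_cases h : isEmptyGalaxy row
    · rw [if_pos (by simpa [isEmptyGalaxy] using h)]
      rw [ih (k+1) al (er ++ [k])]
      refine Prod.ext ?_ ?_
      · simp only []
        apply List.filter_congr
        intro c _
        simp [List.all_cons, h]
      · have hQ : ((fun j => isEmptyGalaxy ((row :: t).getD j [])) ∘ Nat.succ)
            = (fun j => isEmptyGalaxy (t.getD j [])) := by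
          funext j; simp [Function.comp]
        have hF : ((fun x => x + k) ∘ Nat.succ) = (fun x => x + (k + 1)) := by
          funext x; simp only [Function.comp_apply]; omega
        simp only [List.length_cons, List.range_succ_eq_map, List.filter_cons,
          List.getD_cons_zero, h, if_pos, List.filter_map, List.map_cons, List.map_map,
          hQ, hF, Nat.zero_add, List.append_assoc, List.singleton_append]
    · rw [if_neg (by simpa [isEmptyGalaxy] using h)]
      rw [ih (k+1) (al.filter (fun c => row.getD c "" == ".")) er]
      refine Prod.ext ?_ ?_
      · simp only [List.filter_filter]
        apply List.filter_congr
        intro c _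
        simp [List.all_cons, h, Bool.and_comm]
      · have hQ : ((fun j => isEmptyGalaxy ((row :: t).getD j [])) ∘ Nat.succ)
            = (fun j => isEmptyGalaxy (t.getD j [])) := by
          funext j; simp [Function.comp]
        have hF : ((fun x => x + k) ∘ Nat.succ) = (fun x => x + (k + 1)) := by
          funext x; simp only [Function.comp_apply]; omega
        simp only [List.length_cons, List.range_succ_eq_map, List.filter_cons,
          List.getD_cons_zero, h, List.filter_map, List.map_map, hQ, hF,
          Bool.false_eq_true, if_false]

-- counting the survivors of a range filter up to c is the prefix count
lemma countP_range_le (P : Nat → Bool) (c n : Nat) (h : c < n) :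
    ((List.range n).filter P).countP (fun e => e ≤ c) = (List.range (c+1)).countP P := by
  rw [List.countP_filter]
  have hn : n = (c+1) + (n - (c+1)) := by omega
  rw [hn, List.range_add, List.countP_append]
  have h2 : (((List.range (n - (c+1))).map (fun x => (c+1) + x)).countP
      (fun a => decide (a ≤ c) && P a)) = 0 := by
    rw [List.countP_eq_zero]
    intro a ha
    obtain ⟨x, _, rfl⟩ := List.mem_map.mp ha
    simp
    omega
  rw [h2, Nat.add_zero]
  apply List.countP_congr
  intro a ha
  have := List.mem_range.mp ha
  simp
  omega

lemma take_eq_map_range {α : Type} (l : List α) (d : α) (m : Nat) (h : m ≤ l.length) :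
    l.take m = (List.range m).map (fun j => l.getD j d) := by
  apply List.ext_getElem
  · simp; omega
  · intro i h1 h2
    simp at h1
    simp [List.getD_eq_getElem?_getD, List.getElem?_eq_getElem (by omega : i < l.length)]

-- ===== VERDICT (by name: the statement is the Claim_ definition above) =====
theorem dp_count_spaces_spec : Claim_equal_dp_count_spaces := by
  intro matrix _ hpre
  obtain ⟨hne, hlen⟩ := hpre
  unfold Spec_dp_count_spaces
  set cols := (matrix.headD []).length with hcols
  -- A's side: closed form from the two loop invariants
  have hA : dp_count_spaces matrix
      = (List.range matrix.length).map (fun r => (List.range cols).map (fun c =>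
          (erPref matrix (r+1), ecPref matrix (c+1)))) := by
    simp only [dp_count_spaces]
    rw [loop1_inv matrix cols matrix.length (le_refl _)]
    have hclean : (List.range matrix.length).map (fun r =>
        if r < matrix.length then List.replicate cols (erPref matrix (r+1), (0:Int))
        else List.replicate cols ((0:Int),(0:Int)))
      = (List.range matrix.length).map (fun r => List.replicate cols (erPref matrix (r+1), (0:Int))) := by
      apply List.map_congr_left; intro r hr; rw [if_pos (List.mem_range.mp hr)]
    rw [hclean, loop2_inv matrix cols cols (le_refl _)]
    simp only []
    apply List.map_congr_left
    intro r _
    apply List.map_congr_left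
    intro c hc
    rw [if_pos (List.mem_range.mp hc)]
  -- B's side: closed form from the sieve invariant
  have hB : dp_count_spaces_alt matrix
      = (List.range matrix.length).map (fun r => (List.range cols).map (fun c =>
          (erPref matrix (r+1), ecPref matrix (c+1)))) := by
    simp only [dp_count_spaces_alt]
    rw [show matrix.zipIdx = matrix.zipIdx 0 from rfl, foldB_inv matrix 0 (List.range cols) []]
    simp only [List.nil_append]
    have hmap0 : ((List.range matrix.length).filter (fun j => isEmptyGalaxy (matrix.getD j []))).map (· + 0)
        = (List.range matrix.length).filter (fun j => isEmptyGalaxy (matrix.getD j [])) := by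
      simp
    rw [hmap0]
    apply List.map_congr_left
    intro r hr
    apply List.map_congr_left
    intro c hc
    have hrlt := List.mem_range.mp hr
    have hclt := List.mem_range.mp hc
    refine Prod.ext ?_ ?_
    · -- row component
      simp only []
      rw [countP_range_le _ r matrix.length hrlt]
      unfold erPref
      rw [take_eq_map_range matrix [] (r+1) (by omega), List.countP_map]
      norm_cast
    · -- column component
      simp only []
      have hfeq : (List.range cols).filter
            (fun c => matrix.all (fun row => isEmptyGalaxy row || row.getD c "" == "."))
          = (List.range cols).filter (colEmptyA matrix) := by
        apply List.filter_congr
        intro c' hc'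
        have hc'lt := List.mem_range.mp hc'
        rw [← hcol_eq matrix c']
        apply all_congr_mem
        intro row hrow
        by_cases hemp : isEmptyGalaxy row
        · have hlenr : c' < row.length := by
            have := hlen row hrow; omega
          have hall : ∀ s ∈ row, s = "." := by
            intro s hs
            simpa using (List.all_eq_true.mp hemp) s hs
          have hdot : (row.getD c' "" == ".") = true := by
            rw [List.getD_eq_getElem?_getD, List.getElem?_eq_getElem hlenr]
            simp [hall row[c'] (List.getElem_mem hlenr)]
          simp only [hemp, Bool.true_or]
          exact hdot.symm
        · simp [hemp]
      rw [hfeq, countP_range_le _ c cols hclt]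
      unfold ecPref
      norm_cast
  rw [hA, hB]
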